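-- pv_equiv track=rewrite | github.com/ludariumgames/Grid | src/pattern_engine.py | _rank_line_sequence_step1
-- ===== SOURCE A (Python) =====
-- from typing import Dict, Iterable, List, Optional, Sequence, Set, Tuple
--
-- def _rank_line_sequence_step1(ranks: Sequence[Optional[int]], domain: Set[int]) -> bool:
--     """
--     Есть ли последовательность длины L с шагом 1, которая совместима с фиксированными значениями.
--     Допускаем и возрастание, и убывание.
--     """
--     L = len(ranks)
--     for start in domain:
--         for direction in (1, -1):
--             ok = True
--             for i in range(L):
--                 expected = start + direction * i
--                 if expected not in domain:
--                     ok = False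
--                     break
--                 fixed = ranks[i]
--                 if fixed is not None and fixed != expected:
--                     ok = False
--                     break
--             if ok:
--                 return True
--     return False
-- ===== SOURCE B (Python) =====
-- def _rank_line_sequence_step1(ranks, domain):
--     L = len(ranks)
--     dset = set(domain)
--     if L == 0:
--         return bool(dset)
--     fixed = next(((i, v) for i, v in enumerate(ranks) if v is not None), None)
--     if fixed is None:
--         # L consecutive integers in dset, scanning only from run starts
--         for x in dset:
--             if x - 1 not in dset and all(x + i in dset for i in range(L)):
--                 return True
--         return False
--     i0, v0 = fixed
--     for d in (1, -1):
--         start = v0 - d * i0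
--         if all((start + d * i) in dset and (r is None or r == start + d * i)
--                for i, r in enumerate(ranks)):
--             return True
--     return False
-- ===== Notes on version B (the rewrite author's own statement) =====
-- stated objective: faster
-- what changed: Instead of trying every domain element as a start in both directions, B derives the unique candidate start per direction from the first fixed rank (one O(L) check each), and when no rank is fixed it looks for L consecutive domain integers, scanning only from run starts of the domain set.
import Mathlib
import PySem

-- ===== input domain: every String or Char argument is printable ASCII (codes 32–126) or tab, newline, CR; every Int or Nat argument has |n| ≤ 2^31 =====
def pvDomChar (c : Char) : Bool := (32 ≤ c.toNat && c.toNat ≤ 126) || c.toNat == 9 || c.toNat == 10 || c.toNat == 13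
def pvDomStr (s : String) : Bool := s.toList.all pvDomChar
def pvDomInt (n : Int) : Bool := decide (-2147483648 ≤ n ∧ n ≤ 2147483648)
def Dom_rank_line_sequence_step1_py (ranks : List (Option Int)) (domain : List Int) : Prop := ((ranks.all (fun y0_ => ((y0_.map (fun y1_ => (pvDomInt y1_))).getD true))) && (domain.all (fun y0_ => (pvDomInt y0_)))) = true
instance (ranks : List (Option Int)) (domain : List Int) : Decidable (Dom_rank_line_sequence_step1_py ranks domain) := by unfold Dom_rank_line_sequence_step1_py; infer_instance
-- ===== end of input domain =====

-- B derives the unique start from the first fixed rank per direction (or, with no fixed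
-- ranks, scans for L consecutive domain integers from run starts), instead of trying
-- every domain element as a start: O(L + |domain|·L/run) vs A's O(|domain|·L).

-- ===== PORT A =====
-- inner 'for i in range(L)' loop with break, over the remaining indices
def pyA_inner (ranks : List (Option Int)) (domain : List Int) (start dir : Int) : List Nat → Bool
  | [] => true
  | i :: rest =>
    let expected := start + dir * (i : Int)
    if !(domain.contains expected) then false
    else
      match ranks.getD i none with
      | some fixed => if fixed != expected then false else pyA_inner ranks domain start dir rest
      | none => pyA_inner ranks domain start dir rest

def rank_line_sequence_step1_py (ranks : List (Option Int)) (domain : List Int) : Bool :=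
  domain.any (fun start => [(1 : Int), -1].any (fun dir =>
    pyA_inner ranks domain start dir (List.range ranks.length)))

-- ===== PORT B =====
-- first index holding a fixed (non-None) rank, with its value
def pyB_firstFixed : List (Option Int) → Option (Nat × Int)
  | [] => none
  | some v :: _ => some (0, v)
  | none :: rest => (pyB_firstFixed rest).map (fun p => (p.1 + 1, p.2))

-- all((start + d*i) in dset and (r is None or r == start + d*i) for i, r in enumerate(ranks))
def pyB_check (ranks : List (Option Int)) (domain : List Int) (start d : Int) : Bool :=
  (PySem.List.enumerate ranks).all (fun p =>
    domain.contains (start + d * p.1) &&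
    (match p.2 with | none => true | some v => v == start + d * p.1))

def rank_line_sequence_step1_py_alt (ranks : List (Option Int)) (domain : List Int) : Bool :=
  if ranks.length == 0 then !domain.isEmpty
  else
    match pyB_firstFixed ranks with
    | none =>
        domain.any (fun x =>
          !(domain.contains (x - 1)) &&
          (List.range ranks.length).all (fun i => domain.contains (x + (i : Int))))
    | some (i0, v0) =>
        [(1 : Int), -1].any (fun d => pyB_check ranks domain (v0 - d * (i0 : Int)) d)

-- ===== PRECONDITION & SPEC =====
def Spec_rank_line_sequence_step1_py (ranks : List (Option Int)) (domain : List Int) (out : Bool) : Prop := out = rank_line_sequence_step1_py_alt ranks domain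
instance (ranks : List (Option Int)) (domain : List Int) (out : Bool) : Decidable (Spec_rank_line_sequence_step1_py ranks domain out) := by unfold Spec_rank_line_sequence_step1_py; infer_instance

-- ===== CLAIM (what is proved, stated in full; the proofs are below) =====
def Claim_equal_rank_line_sequence_step1_py : Prop := ∀ (ranks : List (Option Int)) (domain : List Int), Dom_rank_line_sequence_step1_py ranks domain → Spec_rank_line_sequence_step1_py ranks domain (rank_line_sequence_step1_py ranks domain)

-- ===== LEMMAS AND PROOFS =====

-- a start s and direction d are compatible with ranks and domain
def Chk (ranks : List (Option Int)) (domain : List Int) (s d : Int) : Prop :=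
  ∀ i : Nat, i < ranks.length →
    (s + d * (i : Int)) ∈ domain ∧ ∀ v : Int, ranks.getD i none = some v → v = s + d * (i : Int)

-- L consecutive integers upward from s all lie in domain
def RunUp (domain : List Int) (L : Nat) (s : Int) : Prop :=
  ∀ i : Nat, i < L → s + (i : Int) ∈ domain

lemma inner_iff (ranks : List (Option Int)) (domain : List Int) (s d : Int) :
    ∀ l : List Nat, pyA_inner ranks domain s d l = true ↔
      ∀ i ∈ l, (s + d * (i : Int)) ∈ domain ∧
        ∀ v : Int, ranks.getD i none = some v → v = s + d * (i : Int) := by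
  intro l
  induction l with
  | nil => simp [pyA_inner]
  | cons i rest ih =>
    simp only [pyA_inner, List.mem_cons]
    by_cases hc : (s + d * (i : Int)) ∈ domain
    · simp only [List.contains_iff_mem.mpr hc]
      cases hm : ranks.getD i none with
      | none =>
        simp only [Bool.not_true, Bool.false_eq_true, if_false, ih]
        constructor
        · rintro h j (rfl | hj)
          · exact ⟨hc, by rw [hm]; intro v hv; cases hv⟩
          · exact h j hj
        · intro h j hj; exact h j (Or.inr hj)
      | some v =>
        by_cases hv : v = s + d * (i : Int)
        · simp only [hv, bne_self_eq_false, Bool.not_true, Bool.false_eq_true, if_false, ih]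
          constructor
          · rintro h j (rfl | hj)
            · exact ⟨hc, by rw [hm]; intro w hw; cases hw; exact hv⟩
            · exact h j hj
          · intro h j hj; exact h j (Or.inr hj)
        · simp only [bne_iff_ne, ne_eq, hv, not_false_iff, if_true, Bool.not_true,
            Bool.false_eq_true, if_false]
          constructor
          · intro h; exact absurd h (by simp)
          · intro h
            have := (h i (Or.inl rfl)).2 v hm
            exact absurd this hv
    · have : domain.contains (s + d * (i : Int)) = false := by
        cases hcb : domain.contains (s + d * (i : Int))
        · rfl
        · exact absurd (List.contains_iff_mem.mp hcb) hc
      simp only [this]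
      constructor
      · intro h; exact absurd h (by simp)
      · intro h; exact absurd (h i (Or.inl rfl)).1 hc

lemma A_iff (ranks : List (Option Int)) (domain : List Int) :
    rank_line_sequence_step1_py ranks domain = true ↔
      ∃ s ∈ domain, Chk ranks domain s 1 ∨ Chk ranks domain s (-1) := by
  unfold rank_line_sequence_step1_py
  simp only [List.any_eq_true, List.mem_cons, List.not_mem_nil, or_false,
    inner_iff, List.mem_range]
  constructor
  · rintro ⟨s, hs, d, (rfl | rfl), h⟩
    · exact ⟨s, hs, Or.inl h⟩
    · exact ⟨s, hs, Or.inr h⟩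
  · rintro ⟨s, hs, h | h⟩
    · exact ⟨s, hs, 1, Or.inl rfl, h⟩
    · exact ⟨s, hs, -1, Or.inr rfl, h⟩

lemma pyB_check_iff (ranks : List (Option Int)) (domain : List Int) (s d : Int) :
    pyB_check ranks domain s d = true ↔ Chk ranks domain s d := by
  unfold pyB_check Chk
  simp only [List.all_eq_true]
  constructor
  · intro h i hi
    have := h (((0 : Int) + (i : Int)), ranks[i]) (by
      rw [PySem.List.mem_enumerate_iff]; exact ⟨i, hi, rfl⟩)
    simp only [zero_add] at this
    rw [Bool.and_eq_true] at this
    obtain ⟨h1, h2⟩ := this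
    refine ⟨List.contains_iff_mem.mp h1, ?_⟩
    intro v hv
    rw [List.getD_eq_getElem ranks none hi] at hv
    rw [hv] at h2
    simpa using h2
  · intro h p hp
    rw [PySem.List.mem_enumerate_iff] at hp
    obtain ⟨k, hk, rfl⟩ := hp
    obtain ⟨h1, h2⟩ := h k hk
    simp only [zero_add]
    rw [Bool.and_eq_true]
    refine ⟨List.contains_iff_mem.mpr h1, ?_⟩
    cases hm : ranks[k] with
    | none => simp
    | some v =>
      have : ranks.getD k none = some v := by rw [List.getD_eq_getElem ranks none hk, hm]
      simp [h2 v this]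

lemma ff_none (ranks : List (Option Int)) (h : pyB_firstFixed ranks = none) :
    ∀ i : Nat, ranks.getD i none = none := by
  induction ranks with
  | nil => intro i; simp
  | cons r rest ih =>
    cases r with
    | some v => simp [pyB_firstFixed] at h
    | none =>
      simp only [pyB_firstFixed, Option.map_eq_none_iff] at h
      intro i
      cases i with
      | zero => simp
      | succ j => simpa using ih h j

lemma ff_some (ranks : List (Option Int)) (i0 : Nat) (v0 : Int)
    (h : pyB_firstFixed ranks = some (i0, v0)) :
    i0 < ranks.length ∧ ranks.getD i0 none = some v0 := by
  induction ranks generalizing i0 with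
  | nil => simp [pyB_firstFixed] at h
  | cons r rest ih =>
    cases r with
    | some v =>
      simp only [pyB_firstFixed, Option.some.injEq, Prod.mk.injEq] at h
      obtain ⟨rfl, rfl⟩ := h
      simp
    | none =>
      simp only [pyB_firstFixed, Option.map_eq_some_iff] at h
      obtain ⟨⟨j, w⟩, hj, he⟩ := h
      simp only [Prod.mk.injEq] at he
      obtain ⟨rfl, rfl⟩ := he
      obtain ⟨h1, h2⟩ := ih j hj
      exact ⟨by simpa using Nat.succ_lt_succ h1, by simpa using h2⟩

lemma fixed_case (ranks : List (Option Int)) (domain : List Int) (i0 : Nat) (v0 : Int)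
    (hL : 0 < ranks.length) (hi0 : i0 < ranks.length) (hv0 : ranks.getD i0 none = some v0)
    (d : Int) :
    (∃ s ∈ domain, Chk ranks domain s d) ↔ Chk ranks domain (v0 - d * (i0 : Int)) d := by
  constructor
  · rintro ⟨s, _, h⟩
    have hv := (h i0 hi0).2 v0 hv0
    have hs : s = v0 - d * (i0 : Int) := by linarith
    rwa [hs] at h
  · intro h
    refine ⟨v0 - d * (i0 : Int), ?_, h⟩
    have := (h 0 hL).1
    simpa using this

lemma chk_none_iff (ranks : List (Option Int)) (domain : List Int)
    (hn : ∀ i : Nat, ranks.getD i none = none) (s d : Int) :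
    Chk ranks domain s d ↔ ∀ i : Nat, i < ranks.length → (s + d * (i : Int)) ∈ domain := by
  unfold Chk
  constructor
  · intro h i hi; exact (h i hi).1
  · intro h i hi
    refine ⟨h i hi, ?_⟩
    intro v hv; rw [hn i] at hv; exact absurd hv (by simp)

lemma runup_of_chk1 (ranks : List (Option Int)) (domain : List Int)
    (hn : ∀ i : Nat, ranks.getD i none = none) (s : Int) (h : Chk ranks domain s 1) :
    RunUp domain ranks.length s := by
  intro i hi
  have := ((chk_none_iff ranks domain hn s 1).mp h) i hi
  simpa using this

lemma runup_of_chkneg (ranks : List (Option Int)) (domain : List Int)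
    (hn : ∀ i : Nat, ranks.getD i none = none) (s : Int) (h : Chk ranks domain s (-1)) :
    RunUp domain ranks.length (s - ((ranks.length : Int) - 1)) := by
  intro i hi
  have hj : ranks.length - 1 - i < ranks.length := by omega
  have := ((chk_none_iff ranks domain hn s (-1)).mp h) (ranks.length - 1 - i) hj
  have he : s + (-1) * ((ranks.length - 1 - i : Nat) : Int)
      = s - ((ranks.length : Int) - 1) + (i : Int) := by omega
  rwa [he] at this

lemma chk1_of_runup (ranks : List (Option Int)) (domain : List Int)
    (hn : ∀ i : Nat, ranks.getD i none = none) (s : Int) (h : RunUp domain ranks.length s) :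
    Chk ranks domain s 1 := by
  rw [chk_none_iff ranks domain hn]
  intro i hi
  have := h i hi
  simpa using this

lemma countP_lt_of_mem (l : List Int) (t : Int) (h : t ∈ l) :
    l.countP (fun x => decide (x < t)) < l.countP (fun x => decide (x ≤ t)) := by
  induction l with
  | nil => simp at h
  | cons a l ih =>
    simp only [List.countP_cons]
    rcases List.mem_cons.mp h with heq | hm
    · subst heq
      have h1 : l.countP (fun x => decide (x < t)) ≤ l.countP (fun x => decide (x ≤ t)) := by
        apply List.countP_mono_left
        intro x _ hx
        simp only [decide_eq_true_eq] at hx ⊢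
        omega
      simp only [decide_eq_true_eq]
      have : ¬ (t < t) := lt_irrefl t
      split_ifs <;> omega
    · have := ih hm
      simp only [decide_eq_true_eq]
      split_ifs <;> omega

lemma run_start (domain : List Int) (L : Nat) (hL : 0 < L) :
    ∀ n : Nat, ∀ s : Int, domain.countP (fun x => decide (x < s)) ≤ n →
      RunUp domain L s → ∃ x ∈ domain, (x - 1) ∉ domain ∧ RunUp domain L x := by
  intro n
  induction n with
  | zero =>
    intro s hc hr
    refine ⟨s, by simpa using hr 0 hL, ?_, hr⟩
    intro hmem
    have : 0 < domain.countP (fun x => decide (x < s)) := by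
      rw [List.countP_pos_iff]
      exact ⟨s - 1, hmem, by simp only [decide_eq_true_eq]; omega⟩
    omega
  | succ n ih =>
    intro s hc hr
    by_cases hm : (s - 1) ∈ domain
    · have hr' : RunUp domain L (s - 1) := by
        intro i hi
        cases i with
        | zero => simpa using hm
        | succ j =>
          have := hr j (by omega)
          have he : s - 1 + ((j + 1 : Nat) : Int) = s + (j : Int) := by push_cast; ring
          rwa [he]
      apply ih (s - 1) ?_ hr'
      have h1 : domain.countP (fun x => decide (x < s - 1))
          < domain.countP (fun x => decide (x ≤ s - 1)) := countP_lt_of_mem domain (s - 1) hm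
      have h2 : domain.countP (fun x => decide (x ≤ s - 1))
          = domain.countP (fun x => decide (x < s)) := by
        apply List.countP_congr
        intro x _
        simp only [decide_eq_true_eq]
        omega
      omega
    · exact ⟨s, by simpa using hr 0 hL, hm, hr⟩

lemma B_none_iff (ranks : List (Option Int)) (domain : List Int) :
    (domain.any (fun x =>
      !(domain.contains (x - 1)) &&
      (List.range ranks.length).all (fun i => domain.contains (x + (i : Int)))) = true) ↔
    ∃ x ∈ domain, (x - 1) ∉ domain ∧ RunUp domain ranks.length x := by
  simp only [List.any_eq_true, Bool.and_eq_true, List.all_eq_true, List.mem_range,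
    Bool.not_eq_true', RunUp]
  constructor
  · rintro ⟨x, hx, h1, h2⟩
    refine ⟨x, hx, ?_, fun i hi => List.contains_iff_mem.mp (h2 i hi)⟩
    intro hm
    rw [List.contains_iff_mem.mpr hm] at h1
    exact Bool.true_eq_false.mp h1
  · rintro ⟨x, hx, h1, h2⟩
    refine ⟨x, hx, ?_, fun i hi => List.contains_iff_mem.mpr (h2 i hi)⟩
    cases hc : domain.contains (x - 1)
    · rfl
    · exact absurd (List.contains_iff_mem.mp hc) h1

lemma any_const_true (l : List Int) : l.any (fun _ => true) = !l.isEmpty := by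
  cases l <;> simp

theorem main_eq (ranks : List (Option Int)) (domain : List Int) :
    rank_line_sequence_step1_py ranks domain = rank_line_sequence_step1_py_alt ranks domain := by
  by_cases hL : ranks.length = 0
  · have hr : ranks = [] := List.length_eq_zero_iff.mp hL
    subst hr
    unfold rank_line_sequence_step1_py rank_line_sequence_step1_py_alt
    simp [pyA_inner, any_const_true]
  · have hL' : 0 < ranks.length := Nat.pos_of_ne_zero hL
    rw [Bool.eq_iff_iff, A_iff]
    unfold rank_line_sequence_step1_py_alt
    rw [if_neg (by simpa using hL)]
    cases hff : pyB_firstFixed ranks with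
    | none =>
      have hn := ff_none ranks hff
      rw [B_none_iff]
      constructor
      · rintro ⟨s, hs, h | h⟩
        · exact run_start domain ranks.length hL' _ s le_rfl (runup_of_chk1 ranks domain hn s h)
        · exact run_start domain ranks.length hL' _ _ le_rfl (runup_of_chkneg ranks domain hn s h)
      · rintro ⟨x, hx, _, h⟩
        exact ⟨x, hx, Or.inl (chk1_of_runup ranks domain hn x h)⟩
    | some p =>
      obtain ⟨i0, v0⟩ := p
      obtain ⟨hi0, hv0⟩ := ff_some ranks i0 v0 hff
      simp only [List.any_cons, List.any_nil, Bool.or_false, Bool.or_eq_true,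
        pyB_check_iff]
      rw [← fixed_case ranks domain i0 v0 hL' hi0 hv0 1,
        ← fixed_case ranks domain i0 v0 hL' hi0 hv0 (-1)]
      constructor
      · rintro ⟨s, hs, h | h⟩
        · exact Or.inl ⟨s, hs, h⟩
        · exact Or.inr ⟨s, hs, h⟩
      · rintro (⟨s, hs, h⟩ | ⟨s, hs, h⟩)
        · exact ⟨s, hs, Or.inl h⟩
        · exact ⟨s, hs, Or.inr h⟩

-- ===== VERDICT (by name: the statement is the Claim_ definition above) =====
theorem rank_line_sequence_step1_py_spec : Claim_equal_rank_line_sequence_step1_py := by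
  intro ranks domain _
  unfold Spec_rank_line_sequence_step1_py
  exact main_eq ranks domain
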